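-- pv_equiv track=rewrite | github.com/sumina-codewell/kata | 프로그래머스/0/181926. 수 조작하기 1/수 조작하기 1.py | solution
-- ===== SOURCE A (Python) =====
-- def solution(n, control):
--     via = []
--     for i in control:
--         if i =='w':
--             via.append(+1)
--         elif i =='s':
--             via.append(-1)
--         elif i =='d':
--             via.append(+10)
--         elif i =='a':
--             via.append(-10)
--     final=0
--     for i in via:
--         final += i
--     return n+final
-- ===== SOURCE B (Python) =====
-- def solution(n, control):
--     # Closed form from character counts: each 'w' adds 1, 's' subtracts 1,
--     # 'd' adds 10, 'a' subtracts 10; other characters contribute nothing.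
--     return (n + control.count('w') - control.count('s')
--             + 10 * control.count('d') - 10 * control.count('a'))
-- ===== Notes on version B (the rewrite author's own statement) =====
-- stated objective: simpler
-- what changed: Replaces A's element-wise accumulation (build an increment list, then sum it) with a count-then-closed-form combination: four whole-string str.count calls combined arithmetically, no per-element delta accumulation at all.
import Mathlib
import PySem

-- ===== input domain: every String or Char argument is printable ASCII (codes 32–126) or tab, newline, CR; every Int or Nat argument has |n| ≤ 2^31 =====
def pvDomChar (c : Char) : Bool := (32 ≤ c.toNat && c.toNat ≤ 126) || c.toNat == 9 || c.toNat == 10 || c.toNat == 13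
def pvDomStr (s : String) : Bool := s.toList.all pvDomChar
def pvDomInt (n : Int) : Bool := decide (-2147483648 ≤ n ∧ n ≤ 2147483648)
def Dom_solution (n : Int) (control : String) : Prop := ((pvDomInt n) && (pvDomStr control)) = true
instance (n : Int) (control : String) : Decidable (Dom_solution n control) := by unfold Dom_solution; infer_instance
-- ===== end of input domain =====

-- B replaces A's element-wise accumulation (build an increment list, then sum it)
-- with a closed form over four whole-string character counts (simpler).

-- ===== PORT A =====
def solution (n : Int) (control : String) : Int :=
  let via : List Int := control.toList.foldl (fun via i =>
    if i = 'w' then via ++ [1]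
    else if i = 's' then via ++ [-1]
    else if i = 'd' then via ++ [10]
    else if i = 'a' then via ++ [-10]
    else via) []
  let final : Int := via.foldl (fun final i => final + i) 0
  n + final

-- ===== PORT B =====
def solution_alt (n : Int) (control : String) : Int :=
  n + (PySem.Str.count control "w" : Int) - (PySem.Str.count control "s" : Int)
    + 10 * (PySem.Str.count control "d" : Int) - 10 * (PySem.Str.count control "a" : Int)

-- ===== PRECONDITION & SPEC =====
def Spec_solution (n : Int) (control : String) (out : Int) : Prop := out = solution_alt n control
instance (n : Int) (control : String) (out : Int) : Decidable (Spec_solution n control out) := by unfold Spec_solution; infer_instance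

-- ===== CLAIM (what is proved, stated in full; the proofs are below) =====
def Claim_equal_solution : Prop := ∀ (n : Int) (control : String), Dom_solution n control → Spec_solution n control (solution n control)

-- ===== LEMMAS AND PROOFS =====

-- Python's str.count with a single-character needle is the plain character count.
theorem count_go_single (c : Char) (s : List Char) (fuel acc : Nat) (h : s.length ≤ fuel) :
    PySem.Chars.count.go [c] fuel s acc = acc + s.count c := by
  induction s generalizing fuel acc with
  | nil => cases fuel <;> simp [PySem.Chars.count.go]
  | cons x t ih =>
      cases fuel with
      | zero => simp at h
      | succ f =>
          simp only [PySem.Chars.count.go]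
          by_cases hx : x = c
          · subst hx
            simp [List.isPrefixOf, ih _ _ (by simpa using h)]
            omega
          · have hpre : [c].isPrefixOf (x :: t) = false := by
              simp [List.isPrefixOf]
              exact fun h' => absurd h'.symm hx
            simp [hpre, ih _ _ (by simpa using h), hx]

theorem chars_count_single (c : Char) (s : List Char) :
    PySem.Chars.count s [c] = s.count c := by
  simp [PySem.Chars.count, count_go_single c s s.length 0 le_rfl]

-- Summing A's built-up increment list is B's four-count closed form.
theorem viaSum (l : List Char) (acc : List Int) :
    (l.foldl (fun via i =>
      if i = 'w' then via ++ [1]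
      else if i = 's' then via ++ [-1]
      else if i = 'd' then via ++ [10]
      else if i = 'a' then via ++ [-10]
      else via) acc).foldl (fun final i => final + i) 0
    = acc.foldl (fun final i => final + i) 0
      + (l.count 'w' : Int) - (l.count 's' : Int)
      + 10 * (l.count 'd' : Int) - 10 * (l.count 'a' : Int) := by
  induction l generalizing acc with
  | nil => simp
  | cons x xs ih =>
      simp only [List.foldl_cons]
      by_cases hw : x = 'w' <;> by_cases hs : x = 's' <;> by_cases hd : x = 'd' <;>
        by_cases ha : x = 'a' <;>
      simp_all [List.foldl_append] <;> ring

-- ===== VERDICT (by name: the statement is the Claim_ definition above) =====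
theorem solution_spec : Claim_equal_solution := by
  intro n control _
  unfold Spec_solution solution solution_alt
  dsimp only
  rw [viaSum]
  simp only [PySem.Str.count_eq,
    show ("w" : String).toList = ['w'] from rfl, show ("s" : String).toList = ['s'] from rfl,
    show ("d" : String).toList = ['d'] from rfl, show ("a" : String).toList = ['a'] from rfl,
    chars_count_single]
  simp
  ring
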